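-- pv_equiv track=rewrite | github.com/sergioarojasm98/hyperx-cloud-flight-battery-status-macos | main.py | battery_percent
-- ===== SOURCE A (Python) =====
-- def battery_percent(charge_state, value):
--     ranges = {
--         0x0E: [(89, 10), (119, 15), (148, 20), (159, 25), (169, 30), (179, 35),
--                (189, 40), (199, 45), (209, 50), (219, 55), (239, 60), (255, 65)],
--         0x0F: [(19, 70), (49, 75), (69, 80), (99, 85), (119, 90), (129, 95), (255, 100)]
--     }
--     for max_val, percent in ranges.get(charge_state, []):
--         if value <= max_val:
--             return percent
--     return 0
-- ===== SOURCE B (Python) =====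
-- _TABLES = {
--     0x0E: ([89, 119, 148, 159, 169, 179, 189, 199, 209, 219, 239, 255],
--            [10, 15, 20, 25, 30, 35, 40, 45, 50, 55, 60, 65]),
--     0x0F: ([19, 49, 69, 99, 119, 129, 255],
--            [70, 75, 80, 85, 90, 95, 100]),
-- }
--
--
-- def battery_percent(charge_state, value):
--     tab = _TABLES.get(charge_state)
--     if tab is None:
--         return 0
--     thresholds, percents = tab
--     lo, hi = 0, len(thresholds)
--     while lo < hi:
--         mid = (lo + hi) // 2
--         if thresholds[mid] < value:
--             lo = mid + 1
--         else:
--             hi = mid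
--     return percents[lo] if lo < len(percents) else 0
-- ===== Notes on version B (the rewrite author's own statement) =====
-- stated objective: alternative
-- what changed: Replaces A's linear scan over (threshold, percent) pairs with a hand-written binary search (bisect_left) over parallel threshold/percent lists, returning percents[lo] if the insertion index is in range and 0 otherwise.
import Mathlib
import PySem

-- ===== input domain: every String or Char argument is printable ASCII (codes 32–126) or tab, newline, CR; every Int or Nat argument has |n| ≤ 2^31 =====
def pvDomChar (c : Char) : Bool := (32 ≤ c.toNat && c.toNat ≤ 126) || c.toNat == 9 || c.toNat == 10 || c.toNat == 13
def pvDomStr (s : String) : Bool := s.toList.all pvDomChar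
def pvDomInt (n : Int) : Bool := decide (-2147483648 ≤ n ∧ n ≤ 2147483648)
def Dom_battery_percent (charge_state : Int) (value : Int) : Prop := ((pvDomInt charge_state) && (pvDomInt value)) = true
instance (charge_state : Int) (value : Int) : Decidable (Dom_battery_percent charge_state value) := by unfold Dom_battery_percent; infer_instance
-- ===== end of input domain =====

-- B replaces A's linear scan of the threshold table by a hand-written binary search over
-- parallel threshold/percent lists (objective: alternative; no speed claim on tables this small).

-- ===== PORT A =====
-- the dict literal `ranges` of A
def bpRanges : PySem.Dict Int (List (Int × Int)) :=
  PySem.Dict.ofList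
    [(0x0E, [(89, 10), (119, 15), (148, 20), (159, 25), (169, 30), (179, 35),
             (189, 40), (199, 45), (209, 50), (219, 55), (239, 60), (255, 65)]),
     (0x0F, [(19, 70), (49, 75), (69, 80), (99, 85), (119, 90), (129, 95), (255, 100)])]

-- A's `for max_val, percent in …: if value <= max_val: return percent` / `return 0`
def bpLoopA (value : Int) : List (Int × Int) → Int
  | [] => 0
  | (maxVal, percent) :: rest =>
      if value ≤ maxVal then percent else bpLoopA value rest

def battery_percent (charge_state : Int) (value : Int) : Int :=
  bpLoopA value (PySem.Dict.getD bpRanges charge_state [])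

-- ===== PORT B =====
-- B's module constant _TABLES
def bpTables : PySem.Dict Int (List Int × List Int) :=
  PySem.Dict.ofList
    [(0x0E, ([89, 119, 148, 159, 169, 179, 189, 199, 209, 219, 239, 255],
             [10, 15, 20, 25, 30, 35, 40, 45, 50, 55, 60, 65])),
     (0x0F, ([19, 49, 69, 99, 119, 129, 255],
             [70, 75, 80, 85, 90, 95, 100]))]

-- B's while loop, returning the final `lo` (thresholds[mid] is always in range, so getD 0 is exact)
def bpBisect (thresholds : List Int) (value : Int) (lo hi : Nat) : Nat :=
  if _h : lo < hi then
    let mid := (lo + hi) / 2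
    if thresholds.getD mid 0 < value then
      bpBisect thresholds value (mid + 1) hi
    else
      bpBisect thresholds value lo mid
  else lo
termination_by hi - lo
decreasing_by all_goals omega

def battery_percent_alt (charge_state : Int) (value : Int) : Int :=
  match PySem.Dict.get? bpTables charge_state with
  | none => 0
  | some (thresholds, percents) =>
      let lo := bpBisect thresholds value 0 thresholds.length
      if lo < percents.length then percents.getD lo 0 else 0

-- ===== PRECONDITION & SPEC =====
def Spec_battery_percent (charge_state : Int) (value : Int) (out : Int) : Prop := out = battery_percent_alt charge_state value
instance (charge_state : Int) (value : Int) (out : Int) : Decidable (Spec_battery_percent charge_state value out) := by unfold Spec_battery_percent; infer_instance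

-- ===== CLAIM (what is proved, stated in full; the proofs are below) =====
def Claim_equal_battery_percent : Prop := ∀ (charge_state : Int) (value : Int), Dom_battery_percent charge_state value → Spec_battery_percent charge_state value (battery_percent charge_state value)

-- ===== LEMMAS AND PROOFS =====

-- the two dict literals, as plain item lists
theorem bpRanges_mk : bpRanges = PySem.Dict.mk
    [(0x0E, [(89, 10), (119, 15), (148, 20), (159, 25), (169, 30), (179, 35),
             (189, 40), (199, 45), (209, 50), (219, 55), (239, 60), (255, 65)]),
     (0x0F, [(19, 70), (49, 75), (69, 80), (99, 85), (119, 90), (129, 95), (255, 100)])] := rfl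

theorem bpTables_mk : bpTables = PySem.Dict.mk
    [(0x0E, ([89, 119, 148, 159, 169, 179, 189, 199, 209, 219, 239, 255],
             [10, 15, 20, 25, 30, 35, 40, 45, 50, 55, 60, 65])),
     (0x0F, ([19, 49, 69, 99, 119, 129, 255],
             [70, 75, 80, 85, 90, 95, 100]))] := rfl

set_option maxHeartbeats 1600000 in
theorem bp_state14 (value : Int) : battery_percent 14 value = battery_percent_alt 14 value := by
  unfold battery_percent battery_percent_alt
  rw [bpRanges_mk, bpTables_mk]
  simp only [PySem.Dict.getD_eq_get?_getD, PySem.Dict.get?_mk_cons]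
  norm_num
  simp [bpLoopA, bpBisect]
  split_ifs <;> simp_all <;> omega

theorem bp_state15 (value : Int) : battery_percent 15 value = battery_percent_alt 15 value := by
  unfold battery_percent battery_percent_alt
  rw [bpRanges_mk, bpTables_mk]
  simp only [PySem.Dict.getD_eq_get?_getD, PySem.Dict.get?_mk_cons]
  norm_num
  simp [bpLoopA, bpBisect]
  split_ifs <;> simp_all <;> omega

theorem bp_other (charge_state value : Int) (h14 : charge_state ≠ 14) (h15 : charge_state ≠ 15) :
    battery_percent charge_state value = battery_percent_alt charge_state value := by
  unfold battery_percent battery_percent_alt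
  rw [bpRanges_mk, bpTables_mk]
  simp [PySem.Dict.getD_eq_get?_getD, PySem.Dict.get?_mk_cons, Ne.symm h14, Ne.symm h15]
  simp [PySem.Dict.get?, bpLoopA]

-- ===== VERDICT (by name: the statement is the Claim_ definition above) =====
theorem battery_percent_spec : Claim_equal_battery_percent := by
  intro charge_state value _
  unfold Spec_battery_percent
  by_cases h14 : charge_state = 14
  · subst h14; exact bp_state14 value
  · by_cases h15 : charge_state = 15
    · subst h15; exact bp_state15 value
    · exact bp_other charge_state value h14 h15
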